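-- pv_equiv track=rewrite | github.com/MonkeyUI-dev/MonkeyUI | backend/apps/design_system/tasks.py | merge_color_dicts
-- ===== SOURCE A (Python) =====
-- def merge_color_dicts(color_dicts: list[dict]) -> dict:
--     """
--     Merge multiple color dictionaries, taking the first non-empty value for each key.
--
--     Args:
--         color_dicts: List of color dicts
--
--     Returns:
--         Merged color dict
--     """
--     if not color_dicts:
--         return {}
--
--     merged = {}
--     all_keys = set()
--     for d in color_dicts:
--         all_keys.update(d.keys())
--
--     for key in all_keys:
--         for d in color_dicts:
--             if key in d and d[key]:
--                 merged[key] = d[key]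
--                 break
--
--     return merged
-- ===== SOURCE B (Python) =====
-- def merge_color_dicts(color_dicts: list[dict]) -> dict:
--     """Single pass over all items: record key order and the first truthy value
--     per key at once, then emit keys that got a truthy value."""
--     order = {}   # keys in first-seen order
--     first = {}   # key -> first truthy value seen
--     for d in color_dicts:
--         for k, v in d.items():
--             order[k] = None
--             if v and k not in first:
--                 first[k] = v
--     return {k: first[k] for k in order if k in first}
-- ===== Notes on version B (the rewrite author's own statement) =====
-- stated objective: faster
-- what changed: Instead of collecting all keys and then rescanning every dict per key, B makes one pass over all items, recording key order and the first truthy value per key in hash maps, then emits the result.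
import Mathlib
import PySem

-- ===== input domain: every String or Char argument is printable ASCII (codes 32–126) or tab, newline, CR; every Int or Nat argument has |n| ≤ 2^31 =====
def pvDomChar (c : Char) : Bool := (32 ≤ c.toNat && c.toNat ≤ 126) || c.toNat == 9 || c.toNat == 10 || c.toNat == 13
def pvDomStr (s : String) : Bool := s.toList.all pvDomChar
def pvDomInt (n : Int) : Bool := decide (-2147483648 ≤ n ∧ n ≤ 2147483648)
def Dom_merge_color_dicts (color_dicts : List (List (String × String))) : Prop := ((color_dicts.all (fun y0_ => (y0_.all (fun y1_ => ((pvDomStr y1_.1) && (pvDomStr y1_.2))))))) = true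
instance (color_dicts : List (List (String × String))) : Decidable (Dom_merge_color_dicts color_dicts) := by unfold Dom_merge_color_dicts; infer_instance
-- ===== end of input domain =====

-- B replaces A's per-key rescan of all dicts by ONE pass over all items that records
-- key order and the first truthy value per key; return VALUE equivalence is proved
-- (the Lean ports fix the key order to first-encounter order; Python set/dict output
-- order is compared as a dict, ignoring order).

-- ===== PORT A =====
-- A's inner 'for d in color_dicts: if key in d and d[key]: merged[key] = d[key]; break'
def pvLoopA (k : String) (m : PySem.Dict String String) :
    List (PySem.Dict String String) → PySem.Dict String String
  | [] => m
  | d :: rest =>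
      match d.get? k with
      | some v => if v ≠ "" then m.insert k v else pvLoopA k m rest
      | none => pvLoopA k m rest

def merge_color_dicts (color_dicts : List (List (String × String))) : List (String × String) :=
  if color_dicts = [] then []
  else
    let ds := color_dicts.map PySem.Dict.ofList
    let all_keys := ds.foldl (fun s d => PySem.Set.update s d.keys) PySem.Set.empty
    let merged := all_keys.foldl (fun m k => pvLoopA k m ds) PySem.Dict.empty
    merged.items

-- ===== PORT B =====
-- one pass: (key order as an ordered set, first-truthy map); then emit
def pvStepB (st : PySem.Set String × PySem.Dict String String) (p : String × String) :
    PySem.Set String × PySem.Dict String String :=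
  (PySem.Set.add st.1 p.1,
   if p.2 ≠ "" ∧ st.2.contains p.1 = false then st.2.insert p.1 p.2 else st.2)

def merge_color_dicts_alt (color_dicts : List (List (String × String))) : List (String × String) :=
  let st := color_dicts.foldl
      (fun st d => (PySem.Dict.ofList d).items.foldl pvStepB st)
      (PySem.Set.empty, PySem.Dict.empty)
  st.1.filterMap (fun k => (st.2.get? k).map (fun v => (k, v)))

-- ===== PRECONDITION & SPEC =====
def Spec_merge_color_dicts (color_dicts : List (List (String × String))) (out : List (String × String)) : Prop := out = merge_color_dicts_alt color_dicts
instance (color_dicts : List (List (String × String))) (out : List (String × String)) : Decidable (Spec_merge_color_dicts color_dicts out) := by unfold Spec_merge_color_dicts; infer_instance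

-- ===== CLAIM (what is proved, stated in full; the proofs are below) =====
def Claim_equal_merge_color_dicts : Prop := ∀ (color_dicts : List (List (String × String))), Dom_merge_color_dicts color_dicts → Spec_merge_color_dicts color_dicts (merge_color_dicts color_dicts)

-- ===== LEMMAS AND PROOFS =====

-- first truthy value for key k across the dicts, in order
def pvFirst (k : String) : List (PySem.Dict String String) → Option String
  | [] => none
  | d :: rest =>
      match d.get? k with
      | some v => if v ≠ "" then some v else pvFirst k rest
      | none => pvFirst k rest

lemma pvLoopA_eq (k : String) (m : PySem.Dict String String)
    (ds : List (PySem.Dict String String)) :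
    pvLoopA k m ds = match pvFirst k ds with
      | some v => m.insert k v
      | none => m := by
  induction ds with
  | nil => rfl
  | cons d rest ih =>
      simp only [pvLoopA, pvFirst]
      cases h : d.get? k with
      | none => exact ih
      | some v =>
          by_cases hv : v = "" <;> simp [hv, ih]

-- B's pair fold splits: the two components evolve independently
lemma pvStepB_fold_split (st : PySem.Set String × PySem.Dict String String)
    (l : List (String × String)) :
    l.foldl pvStepB st =
      (l.foldl (fun s p => PySem.Set.add s p.1) st.1,
       l.foldl (fun m (p : String × String) =>
          if p.2 ≠ "" ∧ m.contains p.1 = false then m.insert p.1 p.2 else m) st.2) := by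
  induction l generalizing st with
  | nil => rfl
  | cons p l ih => simp [List.foldl_cons, pvStepB, ih]

-- per-item-list lookup form of the first-truthy fold
lemma pvInner_get? (l : List (String × String)) (m : PySem.Dict String String) (k : String) :
    (l.foldl (fun m (p : String × String) =>
        if p.2 ≠ "" ∧ m.contains p.1 = false then m.insert p.1 p.2 else m) m).get? k
      = (m.get? k).or (l.findSome? (fun p => if p.1 = k ∧ p.2 ≠ "" then some p.2 else none)) := by
  induction l generalizing m with
  | nil => simp
  | cons p l ih =>
      obtain ⟨pk, pv⟩ := p
      simp only [List.foldl_cons, List.findSome?_cons]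
      by_cases hk : pk = k
      · subst hk
        by_cases hv : pv = ""
        · simp [hv, ih]
        · cases hc : m.contains pk with
          | true =>
              have hw := PySem.Dict.contains_eq_isSome_get? (d := m) (k := pk)
              rw [hc] at hw
              obtain ⟨w, hwv⟩ := Option.isSome_iff_exists.mp hw.symm
              simp [hv, ih, hwv]
          | false =>
              have hm : m.get? pk = none := by
                have hw := PySem.Dict.contains_eq_isSome_get? (d := m) (k := pk)
                rw [hc] at hw
                exact Option.not_isSome_iff_eq_none.mp (by simp [← hw])
              simp [hv, ih, hm, PySem.Dict.get?_insert_self]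
      · have hne : k ≠ pk := Ne.symm hk
        by_cases hv : pv = "" <;> cases hc : m.contains pk <;>
          simp [hk, hv, ih, PySem.Dict.get?_insert_of_ne m pv hne]

-- on a nodup-keys item list the first-truthy scan agrees with "lookup then test"
lemma pvFindSome_items (l : List (String × String)) (hnd : (l.map (·.1)).Nodup) (k : String) :
    l.findSome? (fun p => if p.1 = k ∧ p.2 ≠ "" then some p.2 else none)
      = ((PySem.Dict.mk l).get? k).bind (fun v => if v = "" then none else some v) := by
  induction l with
  | nil => simp [PySem.Dict.get?]
  | cons p l ih =>
      obtain ⟨pk, pv⟩ := p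
      simp only [List.map_cons, List.nodup_cons] at hnd
      rw [List.findSome?_cons, PySem.Dict.get?_mk_cons]
      by_cases hk : pk = k
      · subst hk
        have hnone : l.findSome? (fun p => if p.1 = pk ∧ p.2 ≠ "" then some p.2 else none) = none := by
          rw [List.findSome?_eq_none_iff]
          intro q hq
          have hne : q.1 ≠ pk := fun h => hnd.1 (h ▸ List.mem_map_of_mem hq)
          simp [hne]
        by_cases hv : pv = "" <;> simp [hv, hnone]
      · simp [hk, ih hnd.2]

-- emission: folding fresh-key conditional inserts and then taking items = filterMap
lemma pvEmit (ks : List String) (F : String → Option String) (m : PySem.Dict String String)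
    (hnd : ks.Nodup) (hfresh : ∀ k ∈ ks, m.contains k = false) :
    (ks.foldl (fun m k => match F k with
        | some v => m.insert k v
        | none => m) m).items
      = m.items ++ ks.filterMap (fun k => (F k).map (fun v => (k, v))) := by
  induction ks generalizing m with
  | nil => simp
  | cons k ks ih =>
      simp only [List.nodup_cons] at hnd
      simp only [List.foldl_cons, List.filterMap_cons]
      cases hF : F k with
      | none =>
          rw [ih _ hnd.2 (fun k' hk' => hfresh k' (List.mem_cons_of_mem _ hk'))]
          simp
      | some v =>
          rw [ih _ hnd.2 ?_]
          · have hit := PySem.Dict.items_insert_of_not_contains m v (hfresh k (by simp))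
            simp [hit]
          · intro k' hk'
            rw [PySem.Dict.contains_insert]
            have hne : k' ≠ k := fun h => hnd.1 (h ▸ hk')
            simp [hne, hfresh k' (List.mem_cons_of_mem _ hk')]

-- B's key set equals A's all_keys set
lemma pvKeys_eq (ds : List (PySem.Dict String String)) (s : PySem.Set String) :
    ds.foldl (fun s d => d.items.foldl (fun s p => PySem.Set.add s p.1) s) s
      = ds.foldl (fun s d => PySem.Set.update s d.keys) s := by
  induction ds generalizing s with
  | nil => rfl
  | cons d rest ih =>
      simp only [List.foldl_cons]
      rw [ih]
      congr 1
      show d.items.foldl (fun s p => PySem.Set.add s p.1) s = PySem.Set.update s d.keys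
      rw [PySem.Set.update, PySem.Dict.keys, List.foldl_map]

-- B's first map looks up to pvFirst across the dicts
lemma pvFirstMap_get? (ds : List (PySem.Dict String String))
    (hnd : ∀ d ∈ ds, d.keys.Nodup) (m : PySem.Dict String String) (k : String) :
    (ds.foldl (fun m d => d.items.foldl (fun m (p : String × String) =>
        if p.2 ≠ "" ∧ m.contains p.1 = false then m.insert p.1 p.2 else m) m) m).get? k
      = (m.get? k).or (pvFirst k ds) := by
  induction ds generalizing m with
  | nil => simp [pvFirst]
  | cons d rest ih =>
      simp only [List.foldl_cons]
      rw [ih (fun d' hd' => hnd d' (List.mem_cons_of_mem _ hd'))]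
      rw [pvInner_get?]
      rw [pvFindSome_items d.items (by exact hnd d (by simp)) k]
      show _ = (m.get? k).or (pvFirst k (d :: rest))
      simp only [pvFirst]
      cases d.get? k with
      | none => simp
      | some v => by_cases hv : v = "" <;> simp [hv]

-- Set folds produce Nodup lists
lemma pvSet_nodup_update (l : List String) (s : PySem.Set String) (hs : s.Nodup) :
    (PySem.Set.update s l).Nodup := by
  induction l generalizing s with
  | nil => exact hs
  | cons x l ih =>
      apply ih
      exact PySem.Set.nodup_add _ _ hs

lemma pvAllKeys_nodup (ds : List (PySem.Dict String String)) (s : PySem.Set String)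
    (hs : s.Nodup) :
    (ds.foldl (fun s d => PySem.Set.update s d.keys) s).Nodup := by
  induction ds generalizing s with
  | nil => exact hs
  | cons d rest ih => exact ih _ (pvSet_nodup_update _ _ hs)

-- ===== VERDICT (by name: the statement is the Claim_ definition above) =====
theorem merge_color_dicts_spec : Claim_equal_merge_color_dicts := by
  intro color_dicts _
  show merge_color_dicts color_dicts = merge_color_dicts_alt color_dicts
  unfold merge_color_dicts merge_color_dicts_alt
  by_cases hnil : color_dicts = []
  · simp [hnil]
  · simp only [hnil, if_false]
    set ds := color_dicts.map PySem.Dict.ofList with hds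
    -- rewrite B's fold over color_dicts as a fold over ds
    have hBfold : color_dicts.foldl
        (fun st d => (PySem.Dict.ofList d).items.foldl pvStepB st)
        (PySem.Set.empty, PySem.Dict.empty)
        = ds.foldl (fun st d => d.items.foldl pvStepB st) (PySem.Set.empty, PySem.Dict.empty) := by
      rw [hds, List.foldl_map]
    rw [hBfold]
    -- split B's pair fold
    have hsplit : ∀ (ds : List (PySem.Dict String String)) (st : PySem.Set String × PySem.Dict String String),
        ds.foldl (fun st d => d.items.foldl pvStepB st) st
          = (ds.foldl (fun s d => d.items.foldl (fun s p => PySem.Set.add s p.1) s) st.1,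
             ds.foldl (fun m d => d.items.foldl (fun m (p : String × String) =>
                if p.2 ≠ "" ∧ m.contains p.1 = false then m.insert p.1 p.2 else m) m) st.2) := by
      intro ds st
      induction ds generalizing st with
      | nil => rfl
      | cons d rest ih => simp only [List.foldl_cons]; rw [pvStepB_fold_split, ih]
    rw [hsplit]
    have hndkeys : ∀ d ∈ ds, d.keys.Nodup := by
      intro d hd
      rw [hds] at hd
      rcases List.mem_map.mp hd with ⟨l, _, rfl⟩
      exact PySem.Dict.nodup_keys_ofList l
    have hkeys := pvKeys_eq ds PySem.Set.empty
    set all_keys := ds.foldl (fun s d => PySem.Set.update s d.keys) PySem.Set.empty with hak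
    have hget : ∀ k, (ds.foldl (fun m d => d.items.foldl (fun m (p : String × String) =>
          if p.2 ≠ "" ∧ m.contains p.1 = false then m.insert p.1 p.2 else m) m)
          PySem.Dict.empty).get? k = pvFirst k ds := by
      intro k
      rw [pvFirstMap_get? ds hndkeys]
      simp
    -- A side: loopA = conditional insert of pvFirst
    have hA : (all_keys.foldl (fun m k => pvLoopA k m ds) PySem.Dict.empty).items
        = all_keys.filterMap (fun k => (pvFirst k ds).map (fun v => (k, v))) := by
      have h := pvEmit all_keys (fun k => pvFirst k ds) PySem.Dict.empty
        (pvAllKeys_nodup ds PySem.Set.empty List.nodup_nil)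
        (fun k _ => by simp)
      have hfold : all_keys.foldl (fun m k => pvLoopA k m ds) PySem.Dict.empty
          = all_keys.foldl (fun m k => match pvFirst k ds with
              | some v => m.insert k v
              | none => m) PySem.Dict.empty := by
        congr 1
        funext m k
        rw [pvLoopA_eq]
      rw [hfold, h]
      show PySem.Dict.empty.items ++ _ = _
      rw [show (PySem.Dict.empty : PySem.Dict String String).items = [] from rfl]
      simp
    rw [hA, hkeys]
    simp only []
    congr 1
    funext k
    rw [hget k]
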